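-- pv_equiv track=rewrite | github.com/Shubham37204/DSA | Square1.py | sequentialSquareNumbers
-- ===== SOURCE A (Python) =====
-- from typing import List
--
-- def sequentialSquareNumbers(n: int) -> List[str]:
--     """
--     Generate sequential square pattern with numbers.
--
--     Args:
--         n: Dimension of square
--
--     Returns:
--         List of strings representing each row
--
--     Time Complexity: O(n^2)
--     Space Complexity: O(n^2)
--     """
--     result = []
--     num = 1
--
--     for i in range(n):
--         row = ""
--         for j in range(n):
--             row += str(num)
--             num += 1
--         result.append(row)
--
--     return result
-- ===== SOURCE B (Python) =====
-- from typing import List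
--
-- def sequentialSquareNumbers(n: int) -> List[str]:
--     if n <= 0:
--         return []
--     nums = [str(k) for k in range(1, n * n + 1)]
--     return [''.join(nums[i * n:(i + 1) * n]) for i in range(n)]
-- ===== Notes on version B (the rewrite author's own statement) =====
-- stated objective: alternative
-- what changed: Replaces A's nested loop that threads a running counter through every row by a two-phase decomposition: first build the flat list of all n*n number strings, then slice it into n consecutive chunks of length n and join each.
import Mathlib
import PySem

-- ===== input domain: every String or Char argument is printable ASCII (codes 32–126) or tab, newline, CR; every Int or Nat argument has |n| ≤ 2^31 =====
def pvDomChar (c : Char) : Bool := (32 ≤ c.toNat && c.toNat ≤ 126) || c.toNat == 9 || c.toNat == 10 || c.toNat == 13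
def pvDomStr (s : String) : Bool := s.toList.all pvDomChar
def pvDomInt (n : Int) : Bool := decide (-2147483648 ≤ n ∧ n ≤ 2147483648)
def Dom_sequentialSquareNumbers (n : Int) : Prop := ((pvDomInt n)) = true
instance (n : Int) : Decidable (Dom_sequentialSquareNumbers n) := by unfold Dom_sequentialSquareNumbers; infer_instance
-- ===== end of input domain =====

-- B replaces A's counter-threading nested loop by a two-phase decomposition (build the flat
-- list of number strings, then slice it into n rows and join each); objective: alternative.

-- ===== PORT A =====
def sequentialSquareNumbers (n : Int) : List String :=
  ((PySem.List.pyRange 0 n 1).foldl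
    (fun (st : List String × Int) _ =>
      let inner := (PySem.List.pyRange 0 n 1).foldl
        (fun (p : String × Int) _ => (p.1 ++ PySem.Int.toStr p.2, p.2 + 1)) ("", st.2)
      (st.1 ++ [inner.1], inner.2))
    ([], 1)).1

-- ===== PORT B =====
def sequentialSquareNumbers_alt (n : Int) : List String :=
  if n ≤ 0 then [] else
  let nums : List String := (PySem.List.pyRange 1 (n * n + 1) 1).map PySem.Int.toStr
  (PySem.List.pyRange 0 n 1).map
    (fun i => PySem.Str.join "" (PySem.List.slice nums (some (i * n)) (some ((i + 1) * n))))

-- ===== PRECONDITION & SPEC =====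
def Spec_sequentialSquareNumbers (n : Int) (out : List String) : Prop := out = sequentialSquareNumbers_alt n
instance (n : Int) (out : List String) : Decidable (Spec_sequentialSquareNumbers n out) := by unfold Spec_sequentialSquareNumbers; infer_instance

-- ===== CLAIM (what is proved, stated in full; the proofs are below) =====
def Claim_equal_sequentialSquareNumbers : Prop := ∀ (n : Int), Dom_sequentialSquareNumbers n → Spec_sequentialSquareNumbers n (sequentialSquareNumbers n)

-- ===== LEMMAS AND PROOFS =====

-- the row of k consecutive number strings starting at m, as both programs produce it
def pvRowStr (m : Int) (k : Nat) : String :=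
  PySem.Str.join "" ((List.range k).map (fun j : Nat => PySem.Int.toStr (m + (j : Int))))

theorem pv_join_eps_cons (x : String) (xs : List String) :
    PySem.Str.join "" (x :: xs) = x ++ PySem.Str.join "" xs := by
  cases xs with
  | nil => simp [PySem.Str.join, PySem.Chars.join_singleton, PySem.Chars.join_nil]
  | cons y ys => simp [PySem.Str.join, PySem.Chars.join_cons_cons]

theorem pvRowStr_succ (m : Int) (k : Nat) :
    pvRowStr m (k + 1) = PySem.Int.toStr m ++ pvRowStr (m + 1) k := by
  unfold pvRowStr
  rw [List.range_succ_eq_map, List.map_cons, pv_join_eps_cons, List.map_map]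
  congr 1
  · norm_num
  · congr 1
    apply List.map_congr_left
    intro j _
    simp only [Function.comp]
    congr 1
    push_cast [Nat.succ_eq_add_one]
    ring

-- A's inner loop: starting from (s, m) it appends the l.length number strings m, m+1, …
theorem pv_inner_fold (l : List Int) :
    ∀ (s : String) (m : Int),
      l.foldl (fun (p : String × Int) _ => (p.1 ++ PySem.Int.toStr p.2, p.2 + 1)) (s, m)
        = (s ++ pvRowStr m l.length, m + l.length) := by
  induction l with
  | nil => intro s m; simp [pvRowStr, PySem.Str.join, PySem.Chars.join_nil]
  | cons x l ih =>
      intro s m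
      rw [List.foldl_cons, ih]
      simp only [List.length_cons, Prod.mk.injEq]
      rw [pvRowStr_succ]
      refine ⟨by rw [String.append_assoc], by push_cast; ring⟩

-- A's outer loop, after the inner loop has been summarised by pv_inner_fold
theorem pv_outer_fold (K : Nat) (l : List Int) :
    ∀ (res : List String) (m : Int),
      l.foldl (fun (st : List String × Int) _ => (st.1 ++ [pvRowStr st.2 K], st.2 + K)) (res, m)
        = (res ++ (List.range l.length).map (fun i : Nat => pvRowStr (m + (i : Int) * K) K),
           m + (l.length : Int) * K) := by
  induction l with
  | nil => intro res m; simp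
  | cons x l ih =>
      intro res m
      rw [List.foldl_cons, ih]
      simp only [List.length_cons, Prod.mk.injEq, List.range_succ_eq_map, List.map_cons,
        List.map_map]
      refine ⟨?_, by push_cast; ring⟩
      rw [List.append_assoc, List.singleton_append]
      congr 1
      congr 1
      · congr 1; push_cast; ring
      · apply List.map_congr_left
        intro i _
        simp only [Function.comp]
        congr 1
        push_cast [Nat.succ_eq_add_one]
        ring

-- closed form of port A
theorem pv_A_eq (n : Int) :
    sequentialSquareNumbers n
      = (List.range n.toNat).map
          (fun i : Nat => pvRowStr (1 + (i : Int) * (n.toNat : Int)) n.toNat) := by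
  unfold sequentialSquareNumbers
  have hstep :
      (fun (st : List String × Int) (_ : Int) =>
        let inner := (PySem.List.pyRange 0 n 1).foldl
          (fun (p : String × Int) _ => (p.1 ++ PySem.Int.toStr p.2, p.2 + 1)) ("", st.2)
        (st.1 ++ [inner.1], inner.2))
      = (fun (st : List String × Int) (_ : Int) =>
          (st.1 ++ [pvRowStr st.2 (PySem.List.pyRange 0 n 1).length],
           st.2 + ((PySem.List.pyRange 0 n 1).length : Int))) := by
    funext st _
    rw [pv_inner_fold]
    simp [String.empty_append]
  rw [hstep, pv_outer_fold]
  simp [PySem.List.length_pyRange_one]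

-- closed form of port B
theorem pv_B_eq (n : Int) :
    sequentialSquareNumbers_alt n
      = (List.range n.toNat).map
          (fun i : Nat => pvRowStr (1 + (i : Int) * (n.toNat : Int)) n.toNat) := by
  unfold sequentialSquareNumbers_alt
  by_cases hpos : n ≤ 0
  · rw [if_pos hpos]
    have h0 : n.toNat = 0 := by omega
    simp [h0]
  rw [if_neg hpos]
  have hn : 0 ≤ n := by omega
  · obtain ⟨k, hk⟩ := Int.eq_ofNat_of_zero_le hn
    subst hk
    have hnums : (PySem.List.pyRange 1 ((k : Int) * (k : Int) + 1) 1).map PySem.Int.toStr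
        = (List.range (k * k)).map (fun t : Nat => PySem.Int.toStr (1 + (t : Int))) := by
      rw [PySem.List.pyRange_one, List.map_map]
      have : ((k : Int) * (k : Int) + 1 - 1).toNat = k * k := by
        rw [add_sub_cancel_right, ← Nat.cast_mul, Int.toNat_natCast]
      rw [this]
      rfl
    rw [hnums, PySem.List.pyRange_one, List.map_map]
    simp only [Int.toNat_natCast]
    apply List.map_congr_left
    intro j hj
    have hjk : j < k := by simpa using hj
    simp only [Function.comp]
    have hlo : ((0 : Int) + (j : Int)) * (k : Int) = ((j * k : Nat) : Int) := by push_cast; ring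
    have hhi : ((0 : Int) + (j : Int) + 1) * (k : Int) = ((j * k + k : Nat) : Int) := by
      push_cast; ring
    rw [hlo, hhi, PySem.List.slice_natCast]
    have hsub : j * k + k - j * k = k := by omega
    rw [hsub, ← List.map_drop, ← List.map_take, List.range_eq_range', List.drop_range',
      List.range'_eq_map_range, ← List.map_take, List.take_range]
    have hmin : min k (k * k - j * k) = k := by
      have : j * k + k ≤ k * k := by
        have := Nat.mul_le_mul_right k (Nat.succ_le_of_lt hjk)
        calc j * k + k = (j + 1) * k := by ring
          _ ≤ k * k := this
      omega
    rw [hmin, ← List.range'_eq_map_range]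
    unfold pvRowStr
    congr 1
    rw [List.range'_eq_map_range, List.map_map]
    apply List.map_congr_left
    intro t _
    simp only [Function.comp]
    congr 1
    push_cast
    ring

-- ===== VERDICT (by name: the statement is the Claim_ definition above) =====
theorem sequentialSquareNumbers_spec : Claim_equal_sequentialSquareNumbers := by
  intro n _
  unfold Spec_sequentialSquareNumbers
  rw [pv_A_eq, pv_B_eq]
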